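-- pv_equiv track=rewrite | github.com/DineshNanda13/Find-nth-minimum-no.-in-a-list | nth_min.py | nth_min
-- ===== SOURCE A (Python) =====
-- def nth_min(lst, n):
--     new_lst = []
--     if (n==1):
--         return min(lst)
--     else:
--         ans = min(lst)
--         for num in lst:
--             if num!=ans:
--                 new_lst.append(num)
--         return nth_min(new_lst, n - 1)
-- ===== SOURCE B (Python) =====
-- def nth_min(lst, n):
--     return sorted(set(lst))[n - 1]
-- ===== Notes on version B (the rewrite author's own statement) =====
-- stated objective: faster
-- what changed: A peels the minimum off the list once per rank by repeated min+filter recursion; B builds the set of distinct values once, sorts it, and indexes the sorted list directly.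
import Mathlib
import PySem

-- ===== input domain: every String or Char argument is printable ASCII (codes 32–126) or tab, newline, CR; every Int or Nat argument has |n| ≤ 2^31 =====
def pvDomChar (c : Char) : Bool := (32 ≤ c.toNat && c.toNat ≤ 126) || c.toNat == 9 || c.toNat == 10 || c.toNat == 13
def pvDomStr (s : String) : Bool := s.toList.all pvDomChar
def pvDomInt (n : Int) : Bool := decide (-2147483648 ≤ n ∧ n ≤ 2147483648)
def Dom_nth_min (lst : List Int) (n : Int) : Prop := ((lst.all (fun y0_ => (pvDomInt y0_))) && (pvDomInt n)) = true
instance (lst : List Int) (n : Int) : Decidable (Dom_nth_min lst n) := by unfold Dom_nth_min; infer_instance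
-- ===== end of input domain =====

-- ===== PORT A =====
-- Python A: recursively peel off min(lst) and the equal elements, n-1 times, then return min.
-- Where Python's min([]) raises ValueError (lst empty, n exhausted), the port returns 0; Pre_ excludes those inputs.
def nth_min (lst : List Int) (n : Int) : Int :=
  if n == 1 then (PySem.List.min? lst (fun x => x)).getD 0
  else
    match _h : PySem.List.min? lst (fun x => x) with
    | none => 0
    | some ans =>
        nth_min (lst.foldl (fun acc num => if num ≠ ans then acc ++ [num] else acc) []) (n - 1)
termination_by lst.length
decreasing_by
  simp only [List.foldl_subtype, List.unattach_attach, dite_eq_ite]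
  rw [PySem.List.foldl_append_ite_eq_filter]
  simp only [List.nil_append]
  have hm : ans ∈ lst := PySem.List.min?_mem _h
  exact List.length_filter_lt_length_iff_exists.mpr ⟨ans, hm, by simp⟩

-- ===== PORT B =====
-- B: sorted(set(lst))[n - 1]
def nth_min_alt (lst : List Int) (n : Int) : Int :=
  (PySem.List.pyGet? (PySem.List.sorted (PySem.Set.ofList lst) (fun x => x) false) (n - 1)).getD 0

-- ===== PRECONDITION & SPEC =====
-- Pre_ is exactly where Python A returns: ranks 1..(number of distinct elements); outside, A raises ValueError (min of empty list).
def Pre_nth_min (lst : List Int) (n : Int) : Prop :=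
  1 ≤ n ∧ n ≤ (PySem.Set.ofList lst).length
instance (lst : List Int) (n : Int) : Decidable (Pre_nth_min lst n) := by unfold Pre_nth_min; infer_instance
def pvWitness_nth_min : List Int × Int := ([3, 1, 2, 1], 2)
def Spec_nth_min (lst : List Int) (n : Int) (out : Int) : Prop := out = nth_min_alt lst n
instance (lst : List Int) (n : Int) (out : Int) : Decidable (Spec_nth_min lst n out) := by unfold Spec_nth_min; infer_instance

-- ===== CLAIM (what is proved, stated in full; the proofs are below) =====
def Claim_equal_nth_min : Prop := ∀ (lst : List Int) (n : Int), Dom_nth_min lst n → Pre_nth_min lst n → Spec_nth_min lst n (nth_min lst n)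

-- ===== LEMMAS AND PROOFS =====

-- xs[i] for i ≥ 1 on a cons: shift the index.
theorem pyGet?_cons_shift (x : Int) (xs : List Int) (i : Int) (h : 1 ≤ i) :
    PySem.List.pyGet? (x::xs) i = PySem.List.pyGet? xs (i-1) := by
  simp only [PySem.List.pyGet?, PySem.List.pyIdx?]
  have h0 : (0:Int) ≤ i := by omega
  have h1 : (0:Int) ≤ i - 1 := by omega
  simp only [if_pos h0, if_pos h1, List.length_cons]
  by_cases h2 : i < (xs.length : Int) + 1
  · have h2' : i < ((xs.length + 1 : Nat) : Int) := by push_cast; omega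
    have h3 : i - 1 < (xs.length : Int) := by omega
    rw [if_pos h2', if_pos h3]
    have ht : i.toNat = (i-1).toNat + 1 := by omega
    rw [ht]
    simp
  · have h2' : ¬ i < ((xs.length + 1 : Nat) : Int) := by push_cast; omega
    have h3 : ¬ i - 1 < (xs.length : Int) := by omega
    rw [if_neg h2', if_neg h3]
    rfl

-- sorted(set(lst)) starts with min(lst), and its tail is sorted(set(lst with all copies of the min removed)).
theorem sortedSet_min_cons (lst : List Int) (m : Int)
    (hm : PySem.List.min? lst (fun x => x) = some m) :
    PySem.List.sorted (PySem.Set.ofList lst) (fun x => x) false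
      = m :: PySem.List.sorted (PySem.Set.ofList (lst.filter (fun x => decide ¬ x = m))) (fun x => x) false := by
  have hmem : m ∈ lst := PySem.List.min?_mem hm
  have hperm : (PySem.List.sorted (PySem.Set.ofList lst) (fun x => x) false).Perm (PySem.Set.ofList lst) :=
    PySem.List.sorted_perm _ _ _
  have hpw : (PySem.List.sorted (PySem.Set.ofList lst) (fun x => x) false).Pairwise (· < ·) :=
    PySem.List.sorted_ofList_pairwise_lt lst
  cases hS : PySem.List.sorted (PySem.Set.ofList lst) (fun x => x) false with
  | nil =>
      exfalso
      have : m ∈ PySem.Set.ofList lst := (PySem.Set.mem_ofList _ _).mpr hmem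
      have := (hperm.mem_iff).mpr this
      rw [hS] at this; exact absurd this (List.not_mem_nil)
  | cons h t =>
      rw [hS] at hperm hpw
      have hh_mem : h ∈ PySem.Set.ofList lst := hperm.mem_iff.mp (List.mem_cons_self)
      have hh_lst : h ∈ lst := (PySem.Set.mem_ofList _ _).mp hh_mem
      have hhm : h = m := by
        have h1 : h ≤ m := PySem.List.key_head_sorted_le _ _ hS m ((PySem.Set.mem_ofList _ _).mpr hmem)
        have h2 : m ≤ h := PySem.List.min?_isMin hm h hh_lst
        omega
      subst hhm
      congr 1
      have ht_pw : t.Pairwise (· < ·) := hpw.of_cons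
      have hm_lt : ∀ y ∈ t, h < y := (List.pairwise_cons.mp hpw).1
      have hm_notin : h ∉ t := fun hyt => lt_irrefl h (hm_lt h hyt)
      symm
      apply PySem.List.sorted_eq_of_perm_of_pairwise_lt
      · apply (List.perm_ext_iff_of_nodup ?_ ?_).mpr
        · intro a
          constructor
          · intro hat
            have haS : a ∈ PySem.Set.ofList lst := hperm.mem_iff.mp (List.mem_cons_of_mem _ hat)
            have ha_lst : a ∈ lst := (PySem.Set.mem_ofList _ _).mp haS
            refine (PySem.Set.mem_ofList _ _).mpr ?_
            rw [List.mem_filter]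
            refine ⟨ha_lst, by simp; intro he; exact hm_notin (he ▸ hat)⟩
          · intro haf
            have := (PySem.Set.mem_ofList _ _).mp haf
            rw [List.mem_filter] at this
            obtain ⟨ha_lst, hane⟩ := this
            have hane' : a ≠ h := by simpa using hane
            have : a ∈ h :: t := hperm.mem_iff.mpr ((PySem.Set.mem_ofList _ _).mpr ha_lst)
            cases this with
            | head => exact absurd rfl hane'
            | tail _ h' => exact h'
        · exact ht_pw.imp (fun hab => ne_of_lt hab)
        · exact PySem.Set.nodup_ofList _
      · exact ht_pw

-- One unfolding of A's recursion when min(lst) exists and n ≠ 1.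
theorem nth_min_step (lst : List Int) (n : Int) (m : Int)
    (hm : PySem.List.min? lst (fun x => x) = some m) (hn : ¬ n = 1) :
    nth_min lst n = nth_min (lst.filter (fun x => decide ¬ x = m)) (n - 1) := by
  rw [nth_min, if_neg (by simpa using hn)]
  split
  · next h => rw [hm] at h; cases h
  · next ans h =>
      rw [hm] at h
      injection h with h
      subst h
      rw [PySem.List.foldl_append_ite_eq_filter]
      simp only [List.nil_append]

-- Main induction: for 1 ≤ n ≤ |set(lst)|, peeling the minimum n-1 times lands on sorted(set(lst))[n-1].
theorem nth_min_main : ∀ (k : Nat) (lst : List Int) (n : Int), n = (k : Int) + 1 →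
    n ≤ (PySem.Set.ofList lst).length →
    nth_min lst n = nth_min_alt lst n := by
  intro k
  induction k with
  | zero =>
      intro lst n hn hle
      have hn1 : n = 1 := by omega
      subst hn1
      cases hmin : PySem.List.min? lst (fun x => x) with
      | none =>
          exfalso
          have : lst = [] := (PySem.List.min?_eq_none_iff _ _).mp hmin
          subst this
          simp [PySem.Set.ofList] at hle
      | some m =>
          rw [nth_min, if_pos (by decide), hmin]
          rw [nth_min_alt, sortedSet_min_cons lst m hmin]
          norm_num
  | succ k ih =>
      intro lst n hn hle
      cases hmin : PySem.List.min? lst (fun x => x) with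
      | none =>
          exfalso
          have : lst = [] := (PySem.List.min?_eq_none_iff _ _).mp hmin
          subst this
          simp [PySem.Set.ofList] at hle
          omega
      | some m =>
          rw [nth_min_step lst n m hmin (by omega)]
          have hlen : (PySem.Set.ofList lst).length
              = (PySem.Set.ofList (lst.filter (fun x => decide ¬ x = m))).length + 1 := by
            have h1 := PySem.List.length_sorted (PySem.Set.ofList lst) (fun x => x) false
            have h2 := PySem.List.length_sorted (PySem.Set.ofList (lst.filter (fun x => decide ¬ x = m))) (fun x => x) false
            rw [sortedSet_min_cons lst m hmin] at h1
            simp only [List.length_cons, h2] at h1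
            omega
          rw [ih _ (n-1) (by push_cast at hn ⊢; omega) (by omega)]
          rw [nth_min_alt, nth_min_alt, sortedSet_min_cons lst m hmin]
          rw [pyGet?_cons_shift _ _ _ (by omega)]

-- ===== VERDICT (by name: the statement is the Claim_ definition above) =====
theorem nth_min_spec : Claim_equal_nth_min := by
  intro lst n _ hpre
  obtain ⟨h1, h2⟩ := hpre
  exact nth_min_main (n - 1).toNat lst n (by omega) h2
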